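-- pv_equiv track=rewrite | github.com/CodewithWitcher/ClashKingAPI | routers/v2/player/utils.py | estimate_individual_attacks_from_stacked
-- ===== SOURCE A (Python) =====
-- def estimate_individual_attacks_from_stacked(stacked_value: int) -> list[int]:
--     """Unstack a stacked trophy value into individual attack trophy values.
--
--     Args:
--         stacked_value: Cumulative trophy value from multiple attacks
--
--     Returns:
--         List of estimated individual attack trophy values
--     """
--     individual_attacks = []
--     remaining = stacked_value
--
--     # Work backwards from the highest possible values
--     while remaining > 0:
--         if remaining >= 40:
--             individual_attacks.append(40)  # 3-star attack
--             remaining -= 40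
--         elif remaining >= 32:
--             individual_attacks.append(32)  # 2-star attack
--             remaining -= 32
--         elif remaining >= 16:
--             individual_attacks.append(16)  # 2-star attack (low end)
--             remaining -= 16
--         elif remaining >= 15:
--             individual_attacks.append(15)  # 1-star attack
--             remaining -= 15
--         elif remaining >= 5:
--             individual_attacks.append(remaining)  # 1-star attack (variable)
--             remaining = 0
--         else:
--             # Handle edge cases - assume minimum attack value
--             individual_attacks.append(max(remaining, 5))
--             remaining = 0
--
--     return individual_attacks
-- ===== SOURCE B (Python) =====
-- def _remainder_attacks(r):
--     # r is in [0, 39]; decompose with one bounded rule application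
--     if r == 0:
--         return []
--     if r <= 4:
--         return [5]
--     if r <= 14:
--         return [r]
--     if r == 15:
--         return [15]
--     if r <= 31:
--         return [16] + _remainder_attacks(r - 16)
--     return [32] + _remainder_attacks(r - 32)
--
--
-- def estimate_individual_attacks_from_stacked(stacked_value: int) -> list[int]:
--     if stacked_value <= 0:
--         return []
--     q, r = divmod(stacked_value, 40)
--     return [40] * q + _remainder_attacks(r)
-- ===== Notes on version B (the rewrite author's own statement) =====
-- stated objective: simpler
-- what changed: Replaces A's repeated 40-subtraction while-loop with a single divmod by 40 ([40]*quotient) plus one bounded decomposition of the remainder in [0,39].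
import Mathlib
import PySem

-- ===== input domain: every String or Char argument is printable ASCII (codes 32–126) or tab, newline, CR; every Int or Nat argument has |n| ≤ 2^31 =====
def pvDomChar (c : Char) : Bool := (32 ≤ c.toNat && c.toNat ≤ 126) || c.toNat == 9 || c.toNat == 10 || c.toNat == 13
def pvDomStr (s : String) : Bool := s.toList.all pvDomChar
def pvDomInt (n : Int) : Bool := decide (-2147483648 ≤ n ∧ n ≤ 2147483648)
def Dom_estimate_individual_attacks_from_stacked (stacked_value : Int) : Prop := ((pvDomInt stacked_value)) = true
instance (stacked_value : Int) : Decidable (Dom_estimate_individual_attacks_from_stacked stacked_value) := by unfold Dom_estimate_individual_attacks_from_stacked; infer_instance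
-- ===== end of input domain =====

-- B replaces A's repeated 40-subtraction loop with one divmod plus a bounded remainder table (objective: simpler/alternative decomposition).

set_option maxRecDepth 4000

-- ===== PORT A =====
-- literal transliteration of A's while loop over the state `remaining`
def aLoop (remaining : Int) : List Int :=
  if remaining > 0 then
    if remaining ≥ 40 then 40 :: aLoop (remaining - 40)
    else if remaining ≥ 32 then 32 :: aLoop (remaining - 32)
    else if remaining ≥ 16 then 16 :: aLoop (remaining - 16)
    else if remaining ≥ 15 then 15 :: aLoop (remaining - 15)
    else if remaining ≥ 5 then [remaining]          -- append remaining; remaining = 0 ends the loop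
    else [max remaining 5]                          -- append max(remaining, 5); remaining = 0 ends the loop
  else []
termination_by remaining.toNat
decreasing_by all_goals omega

def estimate_individual_attacks_from_stacked (stacked_value : Int) : List Int :=
  aLoop stacked_value

-- ===== PORT B =====
-- r is in [0, 39]; decompose with one bounded rule application
def remainderAttacks (r : Int) : List Int :=
  if r = 0 then []
  else if r ≤ 4 then [5]
  else if r ≤ 14 then [r]
  else if r = 15 then [15]
  else if r ≤ 31 then 16 :: remainderAttacks (r - 16)
  else 32 :: remainderAttacks (r - 32)
termination_by r.toNat
decreasing_by all_goals omega

def estimate_individual_attacks_from_stacked_alt (stacked_value : Int) : List Int :=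
  if stacked_value ≤ 0 then []
  else
    List.replicate (PySem.Int.floordiv stacked_value 40).toNat 40
      ++ remainderAttacks (PySem.Int.mod stacked_value 40)

-- ===== PRECONDITION & SPEC =====
def Spec_estimate_individual_attacks_from_stacked (stacked_value : Int) (out : List Int) : Prop := out = estimate_individual_attacks_from_stacked_alt stacked_value
instance (stacked_value : Int) (out : List Int) : Decidable (Spec_estimate_individual_attacks_from_stacked stacked_value out) := by unfold Spec_estimate_individual_attacks_from_stacked; infer_instance

-- ===== CLAIM (what is proved, stated in full; the proofs are below) =====
def Claim_equal_estimate_individual_attacks_from_stacked : Prop := ∀ (stacked_value : Int), Dom_estimate_individual_attacks_from_stacked stacked_value → Spec_estimate_individual_attacks_from_stacked stacked_value (estimate_individual_attacks_from_stacked stacked_value)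

-- ===== LEMMAS AND PROOFS =====

-- unfold PySem.Int.floordiv/mod at the positive divisor 40
lemma fd40 (v : Int) : PySem.Int.floordiv v 40 = v / 40 :=
  PySem.Int.floordiv_eq_ediv_of_pos (by norm_num)

lemma md40 (v : Int) : PySem.Int.mod v 40 = v % 40 :=
  PySem.Int.mod_eq_emod_of_pos (by norm_num)

-- branch unfoldings of A's loop
lemma aLoop_nonpos (r : Int) (h : r ≤ 0) : aLoop r = [] := by
  rw [aLoop, if_neg (by omega)]

lemma aLoop_lt5 (r : Int) (h1 : 0 < r) (h2 : r < 5) : aLoop r = [max r 5] := by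
  rw [aLoop, if_pos h1, if_neg (by omega), if_neg (by omega), if_neg (by omega),
      if_neg (by omega), if_neg (by omega)]

lemma aLoop_lt15 (r : Int) (h1 : 5 ≤ r) (h2 : r < 15) : aLoop r = [r] := by
  rw [aLoop, if_pos (by omega), if_neg (by omega), if_neg (by omega), if_neg (by omega),
      if_neg (by omega), if_pos (by omega)]

lemma aLoop_15 : aLoop 15 = [15] := by
  rw [aLoop, if_pos (by norm_num), if_neg (by norm_num), if_neg (by norm_num),
      if_neg (by norm_num), if_pos (by norm_num),
      show (15 : Int) - 15 = 0 by norm_num, aLoop_nonpos 0 le_rfl]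

lemma aLoop_lt32 (r : Int) (h1 : 16 ≤ r) (h2 : r < 32) : aLoop r = 16 :: aLoop (r - 16) := by
  rw [aLoop, if_pos (by omega), if_neg (by omega), if_neg (by omega), if_pos (by omega)]

lemma aLoop_lt40 (r : Int) (h1 : 32 ≤ r) (h2 : r < 40) : aLoop r = 32 :: aLoop (r - 32) := by
  rw [aLoop, if_pos (by omega), if_neg (by omega), if_pos (by omega)]

lemma aLoop_peel (v : Int) (h : 40 ≤ v) : aLoop v = 40 :: aLoop (v - 40) := by
  rw [aLoop, if_pos (by omega), if_pos (by omega)]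

-- branch unfoldings of B's remainder table
lemma rem_0 : remainderAttacks 0 = [] := by
  rw [remainderAttacks, if_pos rfl]

lemma rem_le4 (r : Int) (h1 : 0 < r) (h2 : r ≤ 4) : remainderAttacks r = [5] := by
  rw [remainderAttacks, if_neg (by omega), if_pos (by omega)]

lemma rem_le14 (r : Int) (h1 : 5 ≤ r) (h2 : r ≤ 14) : remainderAttacks r = [r] := by
  rw [remainderAttacks, if_neg (by omega), if_neg (by omega), if_pos (by omega)]

lemma rem_15 : remainderAttacks 15 = [15] := by
  rw [remainderAttacks, if_neg (by norm_num), if_neg (by norm_num), if_neg (by norm_num),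
      if_pos rfl]

lemma rem_le31 (r : Int) (h1 : 16 ≤ r) (h2 : r ≤ 31) :
    remainderAttacks r = 16 :: remainderAttacks (r - 16) := by
  rw [remainderAttacks, if_neg (by omega), if_neg (by omega), if_neg (by omega),
      if_neg (by omega), if_pos (by omega)]

lemma rem_ge32 (r : Int) (h1 : 32 ≤ r) :
    remainderAttacks r = 32 :: remainderAttacks (r - 32) := by
  rw [remainderAttacks, if_neg (by omega), if_neg (by omega), if_neg (by omega),
      if_neg (by omega), if_neg (by omega)]

-- On remainders 0 ≤ r ≤ 15, A's loop agrees with B's table.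
lemma small15 (r : Int) (h0 : 0 ≤ r) (h : r ≤ 15) : aLoop r = remainderAttacks r := by
  rcases lt_or_ge r 1 with h1 | h1
  · rw [show r = 0 by omega, aLoop_nonpos 0 le_rfl, rem_0]
  · rcases lt_or_ge r 5 with h2 | h2
    · rw [aLoop_lt5 r (by omega) h2, rem_le4 r (by omega) (by omega),
          show max r 5 = 5 by omega]
    · rcases lt_or_ge r 15 with h3 | h3
      · rw [aLoop_lt15 r h2 h3, rem_le14 r h2 (by omega)]
      · rw [show r = 15 by omega, aLoop_15, rem_15]

-- On remainders 0 ≤ r < 40, A's loop agrees with B's table.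
lemma aLoop_eq_remainder (r : Int) (h0 : 0 ≤ r) (h40 : r < 40) :
    aLoop r = remainderAttacks r := by
  rcases lt_or_ge r 16 with h1 | h1
  · exact small15 r h0 (by omega)
  · rcases lt_or_ge r 32 with h2 | h2
    · rw [aLoop_lt32 r h1 h2, rem_le31 r h1 (by omega), small15 (r - 16) (by omega) (by omega)]
    · rw [aLoop_lt40 r h2 h40, rem_ge32 r h2, small15 (r - 32) (by omega) (by omega)]

-- For v ≥ 40, B's closed form peels one 40 as well.
lemma alt_peel (v : Int) (h : 40 ≤ v) :
    estimate_individual_attacks_from_stacked_alt v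
      = 40 :: estimate_individual_attacks_from_stacked_alt (v - 40) := by
  unfold estimate_individual_attacks_from_stacked_alt
  rw [fd40, fd40, md40, md40, if_neg (by omega)]
  by_cases hz : v - 40 ≤ 0
  · have hv : v = 40 := by omega
    subst hv
    rw [if_pos hz]
    norm_num [rem_0]
  · have hd : v / 40 = (v - 40) / 40 + 1 := by omega
    have hm : v % 40 = (v - 40) % 40 := by omega
    rw [if_neg hz, hd, hm,
        show ((v - 40) / 40 + 1).toNat = ((v - 40) / 40).toNat + 1 by omega,
        List.replicate_succ]
    rfl

lemma main_nat (n : Nat) :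
    aLoop (n : Int) = estimate_individual_attacks_from_stacked_alt (n : Int) := by
  induction n using Nat.strong_induction_on with
  | _ n ih =>
    by_cases h40 : (n : Int) < 40
    · rw [aLoop_eq_remainder _ (by omega) h40]
      unfold estimate_individual_attacks_from_stacked_alt
      by_cases hz : (n : Int) ≤ 0
      · rw [if_pos hz, show (n : Int) = 0 by omega, rem_0]
      · rw [if_neg hz, fd40, md40,
            show (n : Int) / 40 = 0 by omega,
            show (n : Int) % 40 = (n : Int) by omega]
        simp
    · have h : 40 ≤ (n : Int) := by omega
      have hsub : (n : Int) - 40 = ((n - 40 : Nat) : Int) := by omega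
      rw [aLoop_peel _ h, alt_peel _ h, hsub, ih (n - 40) (by omega)]

lemma main (v : Int) : aLoop v = estimate_individual_attacks_from_stacked_alt v := by
  by_cases hpos : v ≤ 0
  · rw [aLoop_nonpos v hpos, estimate_individual_attacks_from_stacked_alt, if_pos hpos]
  · rw [show v = ((v.toNat : Nat) : Int) by omega]
    exact main_nat v.toNat

-- ===== VERDICT (by name: the statement is the Claim_ definition above) =====
theorem estimate_individual_attacks_from_stacked_spec : Claim_equal_estimate_individual_attacks_from_stacked := by
  intro v _
  exact main v
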